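-- pv_equiv track=rewrite | github.com/DNXBAN001/Intro_Python | Week 6/bukiyip.py | bukiyip_to_decimal
-- ===== SOURCE A (Python) =====
-- def bukiyip_to_decimal(bukiyipNumber):
--     decimalNumber = 0
--     i = 0
--     tempVar = 0
--     while (bukiyipNumber != 0):
--         tempVar = bukiyipNumber % 10
--         decimalNumber += tempVar * pow(3, i)
--         bukiyipNumber = (bukiyipNumber // 10)         #take the bukiyip number and divide it to exclude the remainder
--         i += 1
--     return decimalNumber
-- ===== SOURCE B (Python) =====
-- def bukiyip_to_decimal(bukiyipNumber):
--     # Horner's method over the decimal digit string, most significant digit first.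
--     acc = 0
--     for ch in str(bukiyipNumber):
--         acc = acc * 3 + int(ch)
--     return acc
-- ===== Notes on version B (the rewrite author's own statement) =====
-- stated objective: idiomatic
-- what changed: Replaces the least-significant-digit-first remainder/quotient loop that multiplies each digit by an explicitly computed power of three with Horner's rule folded over the decimal digit string most-significant-first, keeping a single accumulator and computing no powers.
import Mathlib
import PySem

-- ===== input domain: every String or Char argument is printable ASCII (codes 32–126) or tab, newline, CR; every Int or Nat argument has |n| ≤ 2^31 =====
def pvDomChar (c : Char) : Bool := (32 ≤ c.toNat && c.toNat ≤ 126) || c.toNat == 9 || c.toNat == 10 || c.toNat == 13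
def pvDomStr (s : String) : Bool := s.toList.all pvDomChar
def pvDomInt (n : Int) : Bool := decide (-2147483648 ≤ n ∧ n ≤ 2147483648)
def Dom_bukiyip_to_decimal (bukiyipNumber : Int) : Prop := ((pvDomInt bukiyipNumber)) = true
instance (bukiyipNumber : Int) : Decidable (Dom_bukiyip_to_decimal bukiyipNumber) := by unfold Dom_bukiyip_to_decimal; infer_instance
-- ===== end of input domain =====

-- ===== PORT A =====
-- B reformulates A by Horner's rule over the decimal digit string (no pow, MSD-first accumulator).
-- Loop of A: `while bukiyipNumber != 0`. For negative input Python loops forever (n//10 stalls at -1),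
-- so those inputs are outside Pre_; the `0 < n` guard below totalizes the port and coincides with
-- `n != 0` on all of Pre_.
def bukiyipLoop (bukiyipNumber decimalNumber : Int) (i : Nat) : Int :=
  if h : 0 < bukiyipNumber then
    bukiyipLoop (PySem.Int.floordiv bukiyipNumber 10)
      (decimalNumber + PySem.Int.mod bukiyipNumber 10 * 3 ^ i) (i + 1)
  else decimalNumber
termination_by bukiyipNumber.toNat
decreasing_by
  rw [PySem.Int.floordiv_eq_ediv_of_pos (by omega : (0:Int) < 10)]
  have h1 : bukiyipNumber / 10 < bukiyipNumber := by
    have hle := Int.ediv_le_self 10 (le_of_lt h)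
    rcases lt_or_eq_of_le hle with h' | h'
    · exact h'
    · exfalso
      have := Int.ediv_le_ediv (by omega : (0:Int) < 10) (le_refl bukiyipNumber)
      omega
  have h2 : 0 ≤ bukiyipNumber / 10 := Int.ediv_nonneg (le_of_lt h) (by omega)
  omega

def bukiyip_to_decimal (bukiyipNumber : Int) : Int :=
  bukiyipLoop bukiyipNumber 0 0

-- ===== PORT B =====
-- `acc = acc*3 + int(ch)` folded over the characters of str(n).
def bukiyip_to_decimal_alt (bukiyipNumber : Int) : Int :=
  (PySem.Int.toChars bukiyipNumber).foldl
    (fun acc ch => acc * 3 + ((PySem.Int.ofChars? [ch]).getD 0)) 0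

-- ===== PRECONDITION & SPEC =====
-- Pre_ excludes negative inputs: Python A loops forever there (n//10 stalls at -1) and
-- Python B raises ValueError on int('-').
def Pre_bukiyip_to_decimal (bukiyipNumber : Int) : Prop := 0 ≤ bukiyipNumber
instance (bukiyipNumber : Int) : Decidable (Pre_bukiyip_to_decimal bukiyipNumber) := by unfold Pre_bukiyip_to_decimal; infer_instance
def pvWitness_bukiyip_to_decimal : Int := 120

def Spec_bukiyip_to_decimal (bukiyipNumber : Int) (out : Int) : Prop := out = bukiyip_to_decimal_alt bukiyipNumber
instance (bukiyipNumber : Int) (out : Int) : Decidable (Spec_bukiyip_to_decimal bukiyipNumber out) := by unfold Spec_bukiyip_to_decimal; infer_instance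

-- ===== CLAIM (what is proved, stated in full; the proofs are below) =====
def Claim_equal_bukiyip_to_decimal : Prop := ∀ (bukiyipNumber : Int), Dom_bukiyip_to_decimal bukiyipNumber → Pre_bukiyip_to_decimal bukiyipNumber → Spec_bukiyip_to_decimal bukiyipNumber (bukiyip_to_decimal bukiyipNumber)

-- ===== LEMMAS AND PROOFS =====

-- common reference value: the decimal digits of m read as base-3 digits
def pvVal (m : Nat) : Int :=
  if m = 0 then 0 else pvVal (m / 10) * 3 + ((m % 10 : Nat) : Int)
decreasing_by exact Nat.div_lt_self (by omega) (by omega)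

theorem bukiyipLoop_eq (m : Nat) : ∀ (dec : Int) (i : Nat),
    bukiyipLoop (m : Int) dec i = dec + pvVal m * 3 ^ i := by
  induction m using Nat.strong_induction_on with
  | _ m ih =>
    intro dec i
    by_cases hm : m = 0
    · subst hm
      rw [bukiyipLoop, pvVal]
      simp
    · rw [bukiyipLoop, pvVal]
      have hpos : (0 : Int) < (m : Int) := by exact_mod_cast Nat.pos_of_ne_zero hm
      rw [dif_pos hpos, if_neg hm]
      rw [(by exact_mod_cast PySem.Int.floordiv_natCast m 10 :
            PySem.Int.floordiv (m : Int) 10 = ((m / 10 : Nat) : Int)),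
          (by exact_mod_cast PySem.Int.mod_natCast m 10 :
            PySem.Int.mod (m : Int) 10 = ((m % 10 : Nat) : Int))]
      rw [ih (m / 10) (Nat.div_lt_self (Nat.pos_of_ne_zero hm) (by omega))]
      ring

theorem digit_val (d : Nat) (hd : d < 10) :
    ((PySem.Int.ofChars? [Nat.digitChar d]).getD 0) = (d : Int) := by
  interval_cases d <;> decide

theorem horner_toDigits (m : Nat) :
    (Nat.toDigits 10 m).foldl
      (fun acc ch => acc * 3 + ((PySem.Int.ofChars? [ch]).getD 0)) 0 = pvVal m := by
  induction m using Nat.strong_induction_on with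
  | _ m ih =>
    by_cases h10 : m < 10
    · rw [Nat.toDigits_of_lt_base h10, pvVal]
      by_cases hm : m = 0
      · subst hm; decide
      · rw [if_neg hm]
        rw [Nat.div_eq_of_lt h10, (by rw [pvVal]; rfl : pvVal 0 = 0)]
        simp [List.foldl, digit_val m h10, Nat.mod_eq_of_lt h10]
    · rw [Nat.toDigits_of_base_le (by omega) (by omega), List.foldl_append]
      rw [ih (m / 10) (Nat.div_lt_self (by omega) (by omega))]
      conv_rhs => rw [pvVal, if_neg (by omega : ¬ m = 0)]
      simp only [List.foldl, digit_val (m % 10) (Nat.mod_lt m (by omega))]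

-- ===== VERDICT (by name: the statement is the Claim_ definition above) =====
theorem bukiyip_to_decimal_spec : Claim_equal_bukiyip_to_decimal := by
  intro n _ hpre
  unfold Spec_bukiyip_to_decimal bukiyip_to_decimal bukiyip_to_decimal_alt
  unfold Pre_bukiyip_to_decimal at hpre
  rw [PySem.Int.toChars, if_neg (by omega)]
  have hn : (n.toNat : Int) = n := Int.toNat_of_nonneg hpre
  rw [horner_toDigits n.toNat]
  have h := bukiyipLoop_eq n.toNat 0 0
  rw [hn] at h
  rw [h]
  simp
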